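-- pv_equiv track=rewrite | github.com/mixuechu/devin-space | backend/app/services/clustering/entity_linking.py | extract_entity_name
-- ===== SOURCE A (Python) =====
-- def extract_entity_name(title: str) -> str:
--     """
--     Extract the main entity name from a server title.
--
--     Args:
--         title: Server title.
--
--     Returns:
--         Main entity name.
--     """
--     common_suffixes = [
--         "server", "mcp", "helper", "tools", "api", "service",
--         "platform", "framework", "library", "sdk", "client"
--     ]
--
--     title_lower = title.lower()
--
--     for suffix in common_suffixes:
--         if title_lower.endswith(f" {suffix}"):
--             return title[:-len(suffix)-1].strip()
--
--     words = title.split()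
--     if len(words) > 1:
--         return words[0]
--
--     return title
-- ===== SOURCE B (Python) =====
-- _SUFFIXES = {
--     "server", "mcp", "helper", "tools", "api", "service",
--     "platform", "framework", "library", "sdk", "client",
-- }
--
--
-- def extract_entity_name(title: str) -> str:
--     before, sep, last = title.rpartition(" ")
--     if sep and last.lower() in _SUFFIXES:
--         return before.strip()
--     words = title.split()
--     if len(words) > 1:
--         return words[0]
--     return title
-- ===== Notes on version B (the rewrite author's own statement) =====
-- stated objective: simpler
-- what changed: Replaces A's 11-iteration per-suffix lowercase endswith scan with a single rpartition at the last space followed by one set-membership lookup of the lowercased last token.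
import Mathlib
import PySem

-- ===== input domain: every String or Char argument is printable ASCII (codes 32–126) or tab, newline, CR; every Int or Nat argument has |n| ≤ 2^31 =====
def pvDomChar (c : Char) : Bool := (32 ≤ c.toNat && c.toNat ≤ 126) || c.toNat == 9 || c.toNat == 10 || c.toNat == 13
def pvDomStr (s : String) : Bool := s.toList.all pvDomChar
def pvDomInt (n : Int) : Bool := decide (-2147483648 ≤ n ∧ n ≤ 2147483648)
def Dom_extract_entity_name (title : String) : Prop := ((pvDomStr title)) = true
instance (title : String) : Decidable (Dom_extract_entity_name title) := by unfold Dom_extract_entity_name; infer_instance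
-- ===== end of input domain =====

-- B replaces A's 11-way per-suffix endswith scan by one rpartition at the last space plus a set lookup of the last token (objective: simpler).

-- ===== PORT A =====
def pvSuffixesA : List String :=
  ["server", "mcp", "helper", "tools", "api", "service",
   "platform", "framework", "library", "sdk", "client"]

-- the 'for suffix in common_suffixes: if title_lower.endswith(f" {suffix}"): return title[:-len(suffix)-1].strip()' loop
def pvALoop (title : String) (tl : List Char) : List String → Option String
  | [] => none
  | suf :: rest =>
      if PySem.Chars.endswith tl (' ' :: suf.toList) then
        some (String.ofList (PySem.Chars.strip
          (PySem.List.slice title.toList none (some (-(suf.toList.length : Int) - 1)))))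
      else pvALoop title tl rest

def extract_entity_name (title : String) : String :=
  -- title_lower = title.lower() (inlined); then the suffix loop, then the fallback
  match pvALoop title (PySem.Chars.lower title.toList) pvSuffixesA with
  | some r => r
  | none =>
      if 1 < (PySem.Str.split₀ title).length
      then (PySem.Str.split₀ title).getD 0 title else title

-- ===== PORT B =====
def pvSuffixSet : PySem.Set String :=
  PySem.Set.ofList
    ["server", "mcp", "helper", "tools", "api", "service",
     "platform", "framework", "library", "sdk", "client"]

-- hand port of title.rpartition(' ') (PySem has no rpartition): some (before, after)
-- around the LAST space, none when there is no space (= empty separator in Python); exact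
def pvRPartSpace : List Char → Option (List Char × List Char)
  | [] => none
  | c :: rest =>
      match pvRPartSpace rest with
      | some (b, a) => some (c :: b, a)
      | none => if c = ' ' then some ([], rest) else none

def extract_entity_name_alt (title : String) : String :=
  match pvRPartSpace title.toList with
  | some (before, last) =>
      if PySem.Set.contains pvSuffixSet (String.ofList (PySem.Chars.lower last)) then
        String.ofList (PySem.Chars.strip before)
      else
        if 1 < (PySem.Str.split₀ title).length
        then (PySem.Str.split₀ title).getD 0 title else title
  | none =>
      if 1 < (PySem.Str.split₀ title).length
      then (PySem.Str.split₀ title).getD 0 title else title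

-- ===== PRECONDITION & SPEC =====
def Spec_extract_entity_name (title : String) (out : String) : Prop := out = extract_entity_name_alt title
instance (title : String) (out : String) : Decidable (Spec_extract_entity_name title out) := by unfold Spec_extract_entity_name; infer_instance

-- ===== CLAIM (what is proved, stated in full; the proofs are below) =====
def Claim_equal_extract_entity_name : Prop := ∀ (title : String), Dom_extract_entity_name title → Spec_extract_entity_name title (extract_entity_name title)

-- ===== LEMMAS AND PROOFS =====

lemma pvLowerChar_eq_space {c : Char} (h : PySem.Chars.lowerChar c = ' ') : c = ' ' := by
  unfold PySem.Chars.lowerChar PySem.Chars.isupper at h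
  split_ifs at h with hu
  · exfalso
    simp only [Bool.and_eq_true, decide_eq_true_eq, Char.le_def,
      UInt32.le_iff_toNat_le] at hu
    have hval : c.toNat = c.val.toNat := rfl
    have hA : ('A' : Char).val.toNat = 65 := by decide
    have hZ : ('Z' : Char).val.toNat = 90 := by decide
    have hv : (c.toNat + 32).isValidChar := Or.inl (by omega)
    have h2 := congrArg Char.toNat h
    rw [Char.toNat_ofNat, if_pos hv] at h2
    have hsp : (' ' : Char).toNat = 32 := by decide
    omega
  · exact h

lemma pvSpace_mem_lower {cs : List Char} (h : ' ' ∈ PySem.Chars.lower cs) : ' ' ∈ cs := by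
  unfold PySem.Chars.lower at h
  rcases List.mem_map.mp h with ⟨c, hc, hlc⟩
  exact (pvLowerChar_eq_space hlc) ▸ hc

lemma pvRPart_none : ∀ cs : List Char, pvRPartSpace cs = none → ' ' ∉ cs := by
  intro cs
  induction cs with
  | nil => simp
  | cons c rest ih =>
      intro h
      simp only [pvRPartSpace] at h
      cases hr : pvRPartSpace rest with
      | some p => rw [hr] at h; cases h
      | none =>
          rw [hr] at h
          by_cases hc : c = ' '
          · rw [if_pos hc] at h; cases h
          · simp only [List.mem_cons, not_or]
            exact ⟨fun he => hc he.symm, ih hr⟩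

lemma pvRPart_some : ∀ cs b a : List Char, pvRPartSpace cs = some (b, a) →
    cs = b ++ ' ' :: a ∧ ' ' ∉ a := by
  intro cs
  induction cs with
  | nil => intro b a h; cases h
  | cons c rest ih =>
      intro b a h
      simp only [pvRPartSpace] at h
      cases hr : pvRPartSpace rest with
      | some p =>
          rw [hr] at h
          obtain ⟨b', a'⟩ := p
          simp only [Option.some.injEq, Prod.mk.injEq] at h
          obtain ⟨hb, ha⟩ := h
          obtain ⟨h1, h2⟩ := ih b' a' hr
          subst hb ha
          exact ⟨by simp [h1], h2⟩
      | none =>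
          rw [hr] at h
          by_cases hc : c = ' '
          · rw [if_pos hc] at h
            simp only [Option.some.injEq, Prod.mk.injEq] at h
            obtain ⟨hb, ha2⟩ := h
            subst hb
            subst ha2
            subst hc
            exact ⟨rfl, pvRPart_none rest hr⟩
          · rw [if_neg hc] at h; cases h

lemma pvSuffix_space_iff {u v s : List Char} (hv : ' ' ∉ v) (hs : ' ' ∉ s) :
    (' ' :: s) <:+ (u ++ ' ' :: v) ↔ s = v := by
  constructor
  · intro h
    have hv' : (' ' :: v) <:+ (u ++ ' ' :: v) := List.suffix_append u (' ' :: v)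
    rcases Nat.lt_or_ge (v.length + 1) (s.length + 1) with hlt | hle
    · have h1 : (' ' :: v) <:+ (' ' :: s) :=
        List.suffix_of_suffix_length_le hv' h (by simp; omega)
      rcases List.suffix_cons_iff.mp h1 with h2 | h2
      · exact ((List.cons_eq_cons.mp h2).2).symm
      · exact absurd (List.IsSuffix.mem (List.mem_cons_self) h2) hs
    · have h1 : (' ' :: s) <:+ (' ' :: v) :=
        List.suffix_of_suffix_length_le h hv' (by simpa using hle)
      rcases List.suffix_cons_iff.mp h1 with h2 | h2
      · exact (List.cons_eq_cons.mp h2).2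
      · exact absurd (List.IsSuffix.mem (List.mem_cons_self) h2) hv
  · rintro rfl
    exact List.suffix_append u (' ' :: s)

lemma pvLoop_none (title : String) (tl : List Char) :
    ∀ L : List String, (∀ suf ∈ L, PySem.Chars.endswith tl (' ' :: suf.toList) = false) →
      pvALoop title tl L = none := by
  intro L
  induction L with
  | nil => intro _; rfl
  | cons suf rest ih =>
      intro h
      simp only [pvALoop]
      rw [h suf (by simp)]
      simp only [Bool.false_eq_true, if_false]
      exact ih fun s hs => h s (by simp [hs])

lemma pvLoop_some (title : String) (tl la : List Char) :
    ∀ L : List String,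
      (∀ suf ∈ L, (PySem.Chars.endswith tl (' ' :: suf.toList) = true ↔ suf.toList = la)) →
      (∃ suf ∈ L, suf.toList = la) →
      pvALoop title tl L = some (String.ofList (PySem.Chars.strip
        (PySem.List.slice title.toList none (some (-(la.length : Int) - 1))))) := by
  intro L
  induction L with
  | nil => intro _ h; simp at h
  | cons suf rest ih =>
      intro hiff hex
      simp only [pvALoop]
      by_cases h : PySem.Chars.endswith tl (' ' :: suf.toList) = true
      · have hla : suf.toList = la := (hiff suf (by simp)).mp h
        rw [h]
        simp [hla]
      · rw [Bool.not_eq_true] at h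
        rw [h]
        simp only [Bool.false_eq_true, if_false]
        refine ih (fun s hs => hiff s (by simp [hs])) ?_
        rcases hex with ⟨s, hs, hla⟩
        rcases List.mem_cons.mp hs with rfl | hs'
        · exact absurd ((hiff s (by simp)).mpr hla) (by simp [h])
        · exact ⟨s, hs', hla⟩

lemma pvSlice_before (b a : List Char) (x : Char) :
    PySem.List.slice (b ++ x :: a) none (some (-(a.length : Int) - 1)) = b := by
  simp only [PySem.List.slice, PySem.List.clampIdx]
  have hlen : (b ++ x :: a).length = b.length + a.length + 1 := by simp; omega
  rw [hlen]
  have h1 : (-(a.length : Int) - 1 < 0) := by omega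
  rw [if_pos h1]
  have h2 : ¬ ((b.length + a.length + 1 : Nat) : Int) + (-(a.length : Int) - 1) < 0 := by
    push_cast; omega
  rw [if_neg h2]
  have h3 : (((b.length + a.length + 1 : Nat) : Int) + (-(a.length : Int) - 1)).toNat
      = b.length := by push_cast; omega
  rw [h3]
  simp [List.take_left']

lemma pvLower_split (b a : List Char) :
    PySem.Chars.lower (b ++ ' ' :: a)
      = PySem.Chars.lower b ++ ' ' :: PySem.Chars.lower a := by
  simp [PySem.Chars.lower]
  decide

-- every condition of A's loop, rewritten through the rpartition decomposition
lemma pvCond_iff (b a : List Char) (ha : ' ' ∉ a) (suf : String)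
    (hsuf : ' ' ∉ suf.toList) :
    (PySem.Chars.endswith (PySem.Chars.lower (b ++ ' ' :: a)) (' ' :: suf.toList) = true
      ↔ suf.toList = PySem.Chars.lower a) := by
  rw [pvLower_split, PySem.Chars.endswith_iff]
  exact pvSuffix_space_iff (fun h => ha (pvSpace_mem_lower h)) hsuf

theorem extract_entity_name_spec : Claim_equal_extract_entity_name := by
  intro title _
  unfold Spec_extract_entity_name extract_entity_name extract_entity_name_alt
  cases hr : pvRPartSpace title.toList with
  | none =>
      have hno : ' ' ∉ title.toList := pvRPart_none _ hr
      have hloop : pvALoop title (PySem.Chars.lower title.toList) pvSuffixesA = none := by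
        refine pvLoop_none _ _ _ fun suf _ => ?_
        rw [Bool.eq_false_iff]
        intro h
        have hsfx := (PySem.Chars.endswith_iff _ _).mp h
        exact hno (pvSpace_mem_lower (List.IsSuffix.mem List.mem_cons_self hsfx))
      simp [hloop]
  | some p =>
      obtain ⟨b, a⟩ := p
      obtain ⟨hcs, ha⟩ := pvRPart_some _ _ _ hr
      have hnospace : ∀ suf ∈ pvSuffixesA, ' ' ∉ suf.toList := by decide
      have hiff : ∀ suf ∈ pvSuffixesA,
          (PySem.Chars.endswith (PySem.Chars.lower title.toList) (' ' :: suf.toList) = true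
            ↔ suf.toList = PySem.Chars.lower a) := by
        intro suf hs
        rw [hcs]
        exact pvCond_iff b a ha suf (hnospace suf hs)
      by_cases hmem : String.ofList (PySem.Chars.lower a) ∈ pvSuffixesA
      · have hc : PySem.Set.contains pvSuffixSet (String.ofList (PySem.Chars.lower a)) = true := by
          rw [PySem.Set.contains, List.contains_iff_mem]
          exact (PySem.Set.mem_ofList _ _).mpr (by simpa [pvSuffixesA] using hmem)
        have hloop := pvLoop_some title (PySem.Chars.lower title.toList)
          (PySem.Chars.lower a) pvSuffixesA hiff
          ⟨String.ofList (PySem.Chars.lower a), hmem, by simp⟩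
        have hlen : (PySem.Chars.lower a).length = a.length := by
          simp [PySem.Chars.lower]
        have hslice : PySem.List.slice title.toList none
            (some (-(a.length : Int) - 1)) = b := by
          rw [hcs]; exact pvSlice_before b a ' '
        rw [hlen, hslice] at hloop
        simp only [hloop, hc, if_true]
      · have hc : PySem.Set.contains pvSuffixSet (String.ofList (PySem.Chars.lower a)) = false := by
          rw [PySem.Set.contains, Bool.eq_false_iff]
          intro h
          rw [List.contains_iff_mem] at h
          exact hmem (by simpa [pvSuffixesA] using (PySem.Set.mem_ofList _ _).mp h)
        have hloop : pvALoop title (PySem.Chars.lower title.toList) pvSuffixesA = none := by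
          refine pvLoop_none _ _ _ fun suf hs => ?_
          rw [Bool.eq_false_iff]
          intro h
          have hla := (hiff suf hs).mp h
          exact hmem (by rw [← hla]; simpa using hs)
        simp only [hloop, hc, Bool.false_eq_true, if_false]
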